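-- pv_equiv track=rewrite | github.com/ihorivliev/Tests | EE6.py | twin_pair
-- ===== SOURCE A (Python) =====
-- from itertools import product, combinations
--
-- nodes = list(range(4))
--
-- def twin_pair(adj):
--     # Size-2 fractality: each unordered pair P has a disjoint twin Q
--     def induced(adj, pair):
--         # returns sorted tuple of booleans for edges within the pair: (i->j, j->i)
--         i, j = pair
--         return (adj[i][j], adj[j][i])
--     all_pairs = list(combinations(nodes, 2))
--     patterns = {pair: induced(adj, pair) for pair in all_pairs}
--     for P, pat in patterns.items():
--         # find a Q != P, disjoint, with same pat
--         if not any(Q != P and set(Q).isdisjoint(P) and patterns[Q] == pat for Q in all_pairs):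
--             return False
--     return True
-- ===== SOURCE B (Python) =====
-- from itertools import combinations
--
-- def twin_pair(adj):
--     # Among 4 nodes the only pair disjoint from P is its complement:
--     # compare each pair's edge pattern directly with its complement's.
--     nodes = list(range(4))
--     for P in combinations(nodes, 2):
--         Q = tuple(sorted(set(nodes) - set(P)))
--         if (adj[P[0]][P[1]], adj[P[1]][P[0]]) != (adj[Q[0]][Q[1]], adj[Q[1]][Q[0]]):
--             return False
--     return True
-- ===== Notes on version B (the rewrite author's own statement) =====
-- stated objective: simpler
-- what changed: B drops A's pattern dictionary and inner any-scan over all pairs: since among 4 nodes the unique pair disjoint from P is its complement, B computes the complement by set difference and compares the two edge-pattern tuples directly, one pass over the 6 pairs.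
import Mathlib
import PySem

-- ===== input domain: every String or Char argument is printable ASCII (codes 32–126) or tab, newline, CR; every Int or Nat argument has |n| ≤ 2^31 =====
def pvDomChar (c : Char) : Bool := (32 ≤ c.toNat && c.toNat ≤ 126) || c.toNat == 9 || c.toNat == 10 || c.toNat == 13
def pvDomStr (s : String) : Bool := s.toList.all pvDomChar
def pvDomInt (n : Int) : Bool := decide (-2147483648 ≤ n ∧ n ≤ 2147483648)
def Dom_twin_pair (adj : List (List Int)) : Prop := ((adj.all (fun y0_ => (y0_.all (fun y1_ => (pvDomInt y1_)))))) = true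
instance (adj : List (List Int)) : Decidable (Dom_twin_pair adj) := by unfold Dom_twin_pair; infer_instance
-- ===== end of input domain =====

-- B replaces A's pattern-dictionary + inner disjoint-scan with a direct comparison of each
-- pair against its (unique) complement pair: simpler, one pass.

-- ===== PORT A =====
-- nodes = list(range(4))
def pvNodes : List Int := PySem.List.pyRange 0 4 1

-- itertools.combinations(nodes, 2) in its order: for each i, all j after it
def pvCombs2 : List Int → List (Int × Int)
  | [] => []
  | x :: xs => (xs.map (fun y => (x, y))) ++ pvCombs2 xs

-- induced(adj, pair) = (adj[i][j], adj[j][i]); none = IndexError (excluded by Pre_)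
def pvInduced (adj : List (List Int)) (p : Int × Int) : Option Int × Option Int :=
  ((PySem.List.pyGet? adj p.1).bind fun r => PySem.List.pyGet? r p.2,
   (PySem.List.pyGet? adj p.2).bind fun r => PySem.List.pyGet? r p.1)

-- the loop over patterns.items(): return False at the first P with no matching disjoint twin
def pvLoopA (allPairs : List (Int × Int))
    (patterns : PySem.Dict (Int × Int) (Option Int × Option Int)) :
    List ((Int × Int) × (Option Int × Option Int)) → Bool
  | [] => true
  | (P, pat) :: rest =>
      if allPairs.any (fun Q =>
          Q ≠ P && (Q.1 ≠ P.1 && Q.1 ≠ P.2 && Q.2 ≠ P.1 && Q.2 ≠ P.2) &&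
          (patterns.getD Q (none, none) == pat)) then
        pvLoopA allPairs patterns rest
      else false

def twin_pair (adj : List (List Int)) : Bool :=
  let all_pairs := pvCombs2 pvNodes
  let patterns : PySem.Dict (Int × Int) (Option Int × Option Int) :=
    all_pairs.foldl (fun d P => d.insert P (pvInduced adj P)) (PySem.Dict.mk [])
  pvLoopA all_pairs patterns patterns.items

-- ===== PORT B =====
-- edge pattern of an ordered index pair (B recomputes it in place, no table)
def pvEdge (adj : List (List Int)) (i j : Int) : Option Int × Option Int :=
  ((PySem.List.pyGet? adj i).bind fun r => PySem.List.pyGet? r j,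
   (PySem.List.pyGet? adj j).bind fun r => PySem.List.pyGet? r i)

def twin_pair_alt (adj : List (List Int)) : Bool :=
  let nodes : List Int := PySem.List.pyRange 0 4 1
  (pvCombs2 nodes).all (fun P =>
    -- Q = tuple(sorted(set(nodes) - set(P))): nodes is ascending, so filtering it
    -- keeps the complement in sorted order — exact
    let q := nodes.filter (fun x => x ≠ P.1 && x ≠ P.2)
    pvEdge adj P.1 P.2 == pvEdge adj (q.headD 0) (q.tail.headD 0))

-- ===== PRECONDITION & SPEC =====
-- Pre_ excludes exactly the inputs where A raises IndexError: it indexes rows 0..3 and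
-- columns 0..3, so the first four rows must exist and each have length ≥ 4.
def Pre_twin_pair (adj : List (List Int)) : Prop :=
  4 ≤ adj.length ∧ ∀ r ∈ adj.take 4, 4 ≤ r.length
instance (adj : List (List Int)) : Decidable (Pre_twin_pair adj) := by
  unfold Pre_twin_pair; infer_instance

def pvWitness_twin_pair : List (List Int) :=
  [[0,1,0,1],[1,0,1,0],[0,1,0,1],[1,0,1,0]]

def Spec_twin_pair (adj : List (List Int)) (out : Bool) : Prop := out = twin_pair_alt adj
instance (adj : List (List Int)) (out : Bool) : Decidable (Spec_twin_pair adj out) := by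
  unfold Spec_twin_pair; infer_instance

-- ===== CLAIM (what is proved, stated in full; the proofs are below) =====
def Claim_equal_twin_pair : Prop :=
  ∀ (adj : List (List Int)), Dom_twin_pair adj → Pre_twin_pair adj →
    Spec_twin_pair adj (twin_pair adj)

-- ===== LEMMAS AND PROOFS =====

-- A's result, evaluated: each pair's pattern must equal its complement's (lookup == pat orientation)
set_option maxHeartbeats 1000000 in
lemma evalA (adj : List (List Int)) : twin_pair adj =
    ((decide (pvEdge adj 2 3 = pvEdge adj 0 1)) && ((decide (pvEdge adj 1 3 = pvEdge adj 0 2)) &&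
     ((decide (pvEdge adj 1 2 = pvEdge adj 0 3)) && ((decide (pvEdge adj 0 3 = pvEdge adj 1 2)) &&
     ((decide (pvEdge adj 0 2 = pvEdge adj 1 3)) && (decide (pvEdge adj 0 1 = pvEdge adj 2 3))))))) := by
  simp only [twin_pair]
  norm_num [pysem, pvCombs2, pvLoopA, pvNodes]
  rfl

-- B's result, evaluated: same six comparisons, oriented pattern(P) == pattern(complement P)
set_option maxHeartbeats 1000000 in
lemma evalB (adj : List (List Int)) : twin_pair_alt adj =
    ((decide (pvEdge adj 0 1 = pvEdge adj 2 3)) && ((decide (pvEdge adj 0 2 = pvEdge adj 1 3)) &&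
     ((decide (pvEdge adj 0 3 = pvEdge adj 1 2)) && ((decide (pvEdge adj 1 2 = pvEdge adj 0 3)) &&
     ((decide (pvEdge adj 1 3 = pvEdge adj 0 2)) && (decide (pvEdge adj 2 3 = pvEdge adj 0 1))))))) := by
  simp only [twin_pair_alt]
  simp only [Lean.Grind.beq_eq_decide_eq]
  norm_num [pysem, pvCombs2, -Prod.mk.injEq]

lemma pvSym (x y : Option Int × Option Int) : decide (x = y) = decide (y = x) :=
  decide_eq_decide.mpr eq_comm

-- ===== VERDICT (by name: the statement is the Claim_ definition above) =====
set_option maxHeartbeats 1000000 in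
theorem twin_pair_spec : Claim_equal_twin_pair := by
  intro adj _ _
  show twin_pair adj = twin_pair_alt adj
  rw [evalA, evalB,
    pvSym (pvEdge adj 2 3) (pvEdge adj 0 1), pvSym (pvEdge adj 1 3) (pvEdge adj 0 2),
    pvSym (pvEdge adj 1 2) (pvEdge adj 0 3)]
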